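-- pv_equiv track=rewrite | github.com/daniel-reich/ubiquitous-fiesta | J7HPbiP9WRTCteazx_5.py | n_differences
-- ===== SOURCE A (Python) =====
-- def n_differences(lst):
--   b = True
--   while b:
--       if len(lst) > 1:
--         lst = [lst[i] - lst[i-1] for i in range(1, len(lst))]
--       else:
--         b = False
--   for i in lst:
--     return i
-- ===== SOURCE B (Python) =====
-- def n_differences(lst):
--   if not lst:
--     return None
--   n = len(lst) - 1
--   total = 0
--   c = 1  # running binomial coefficient C(n, i)
--   for i, x in enumerate(lst):
--     total += (-1 if (n - i) % 2 else 1) * c * x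
--     c = c * (n - i) // (i + 1)
--   return total
-- ===== Notes on version B (the rewrite author's own statement) =====
-- stated objective: faster
-- what changed: Replaces the quadratic loop that rebuilds the whole difference list until one element remains by the closed-form finite-difference formula: a single pass summing (-1)^(n-i)*C(n,i)*lst[i] with a running binomial coefficient.
import Mathlib
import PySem

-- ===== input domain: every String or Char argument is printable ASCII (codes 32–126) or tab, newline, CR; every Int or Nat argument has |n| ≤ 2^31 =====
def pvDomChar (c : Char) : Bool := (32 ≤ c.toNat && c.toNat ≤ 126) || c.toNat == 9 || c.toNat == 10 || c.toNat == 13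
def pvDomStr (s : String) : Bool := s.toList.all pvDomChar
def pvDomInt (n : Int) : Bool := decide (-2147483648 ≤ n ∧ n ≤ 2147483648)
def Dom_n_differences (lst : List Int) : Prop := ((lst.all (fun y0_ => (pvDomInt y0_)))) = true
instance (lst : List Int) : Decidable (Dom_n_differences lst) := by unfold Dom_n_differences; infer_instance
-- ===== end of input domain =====

-- B replaces A's quadratic rebuild-the-difference-list loop by a one-pass signed
-- binomial-weighted sum (the finite-difference formula); equivalence proved for all lists.

-- ===== PORT A =====
-- one pass of A's while-loop body: [lst[i] - lst[i-1] for i in range(1, len(lst))]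
def pvStep (lst : List Int) : List Int :=
  (PySem.List.pyRange 1 (lst.length : Int) 1).map
    (fun i => PySem.List.pyGetD lst i 0 - PySem.List.pyGetD lst (i - 1) 0)

lemma pvStep_length_lt (lst : List Int) (h : lst.length > 1) :
    (pvStep lst).length < lst.length := by
  simp [pvStep, PySem.List.length_pyRange_one]; omega

def n_differences (lst : List Int) : Option Int :=
  if _h : lst.length > 1 then n_differences (pvStep lst)
  else lst.head?    -- `for i in lst: return i` : first element, or None on []
termination_by lst.length
decreasing_by exact pvStep_length_lt lst _h

-- ===== PORT B =====
def n_differences_alt (lst : List Int) : Option Int :=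
  if lst = [] then none
  else
    let n : Int := (lst.length : Int) - 1
    some ((PySem.List.enumerate lst 0).foldl
      (fun (st : Int × Int) (p : Int × Int) =>
        (st.1 + (if PySem.Int.mod (n - p.1) 2 ≠ 0 then -1 else 1) * st.2 * p.2,
         PySem.Int.floordiv (st.2 * (n - p.1)) (p.1 + 1)))
      (0, 1)).1

-- ===== PRECONDITION & SPEC =====
def Spec_n_differences (lst : List Int) (out : Option Int) : Prop := out = n_differences_alt lst
instance (lst : List Int) (out : Option Int) : Decidable (Spec_n_differences lst out) := by unfold Spec_n_differences; infer_instance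

-- ===== CLAIM (what is proved, stated in full; the proofs are below) =====
def Claim_equal_n_differences : Prop := ∀ (lst : List Int), Dom_n_differences lst → Spec_n_differences lst (n_differences lst)

-- ===== LEMMAS AND PROOFS =====

-- the closed-form coefficient sum both ports are reduced to
def pvSum (m : ℕ) (lst : List Int) : ℤ :=
  ∑ k ∈ Finset.range (m + 1), ((-1 : ℤ) ^ (m - k) * (m.choose k)) * lst.getD k 0

lemma pvStep_length (lst : List Int) : (pvStep lst).length = lst.length - 1 := by
  simp [pvStep, PySem.List.length_pyRange_one]

lemma pvStep_getD (lst : List Int) (k : ℕ) (hk : k < lst.length - 1) :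
    (pvStep lst).getD k 0 = lst.getD (k + 1) 0 - lst.getD k 0 := by
  unfold pvStep
  rw [List.getD_eq_getElem?_getD, List.getElem?_map, PySem.List.getElem?_pyRange_one]
  have hk' : k < ((lst.length : Int) - 1).toNat := by omega
  rw [if_pos hk']
  simp only [Option.map_some, Option.getD_some]
  have h1 : (1 : Int) + k = ((k+1 : ℕ) : Int) := by push_cast; ring
  have h2 : ((k+1 : ℕ) : Int) - 1 = ((k : ℕ) : Int) := by push_cast; ring
  rw [h1, h2, PySem.List.pyGetD_natCast, PySem.List.pyGetD_natCast]

-- A computes the iterated forward difference of (lst.getD · 0) at 0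
lemma A_eq_fwdDiff (lst : List Int) (h : lst ≠ []) :
    n_differences lst = some ((fwdDiff (1:ℕ))^[lst.length - 1] (fun k : ℕ => lst.getD k 0) 0) := by
  by_cases hl : lst.length > 1
  · rw [n_differences, dif_pos hl]
    have hsl : (pvStep lst).length = lst.length - 1 := pvStep_length lst
    have hsne : pvStep lst ≠ [] := by
      intro he; rw [he] at hsl; simp at hsl; omega
    rw [A_eq_fwdDiff (pvStep lst) hsne]
    congr 1
    rw [hsl]
    have hm : lst.length - 1 = (lst.length - 1 - 1) + 1 := by omega
    conv_rhs => rw [hm, Function.iterate_succ_apply]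
    rw [fwdDiff_iter_eq_sum_shift, fwdDiff_iter_eq_sum_shift]
    apply Finset.sum_congr rfl
    intro k hk
    simp only [Finset.mem_range] at hk
    congr 1
    have hk2 : k < lst.length - 1 := by omega
    simp only [smul_eq_mul, mul_one, zero_add]
    rw [pvStep_getD lst k hk2]
    simp [fwdDiff]
  · have h1 : lst.length = 1 := by
      cases lst with
      | nil => exact absurd rfl h
      | cons a t => simp at hl ⊢; omega
    rw [n_differences, dif_neg hl]
    cases lst with
    | nil => exact absurd rfl h
    | cons a t =>
      simp only [List.length_cons] at h1
      have ht : t = [] := by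
        cases t with | nil => rfl | cons b u => simp at h1
      subst ht; simp
termination_by lst.length
decreasing_by exact pvStep_length_lt lst hl

lemma A_eq_sum (lst : List Int) (h : lst ≠ []) :
    n_differences lst = some (pvSum (lst.length - 1) lst) := by
  rw [A_eq_fwdDiff lst h, fwdDiff_iter_eq_sum_shift]
  unfold pvSum
  congr 1
  apply Finset.sum_congr rfl
  intro k _
  simp [smul_eq_mul]

-- fold invariant for B's single pass: acc accumulates the signed binomial sum,
-- the second state component stays the running binomial coefficient C(m, t)
lemma B_fold (m : ℕ) : ∀ (ys : List Int) (t : ℕ) (acc : ℤ), t + ys.length = m + 1 →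
    ((PySem.List.enumerate ys (t : Int)).foldl
      (fun (st : Int × Int) (p : Int × Int) =>
        (st.1 + (if PySem.Int.mod (((m : Int)) - p.1) 2 ≠ 0 then -1 else 1) * st.2 * p.2,
         PySem.Int.floordiv (st.2 * (((m : Int)) - p.1)) (p.1 + 1)))
      (acc, (m.choose t : Int))).1
    = acc + ∑ k ∈ Finset.range ys.length,
        ((-1 : ℤ) ^ (m - (t + k)) * (m.choose (t + k))) * ys.getD k 0 := by
  intro ys
  induction ys with
  | nil => intro t acc ht; simp [PySem.List.enumerate_nil]
  | cons y ys ih =>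
    intro t acc ht
    have htm : t ≤ m := by simp at ht; omega
    rw [PySem.List.enumerate_cons]
    simp only [List.foldl_cons]
    have hsub : (m : Int) - (t : Int) = ((m - t : ℕ) : Int) := by omega
    have hsign : (if PySem.Int.mod ((m : Int) - (t : Int)) 2 ≠ 0 then (-1 : ℤ) else 1)
        = (-1 : ℤ) ^ (m - t) := by
      rw [hsub, show (2:Int) = ((2:ℕ):Int) from rfl, PySem.Int.mod_natCast]
      by_cases hp : (m - t) % 2 = 0
      · rw [if_neg (by simp [hp])]
        exact (Nat.even_iff.mpr hp).neg_one_pow.symm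
      · have hp1 : (m - t) % 2 = 1 := by omega
        rw [if_pos (by simp [hp1])]
        exact (Nat.odd_iff.mpr hp1).neg_one_pow.symm
    have hc : PySem.Int.floordiv ((m.choose t : Int) * ((m : Int) - (t : Int))) ((t : Int) + 1)
        = (m.choose (t + 1) : Int) := by
      rw [hsub]
      have : ((m.choose t : ℤ)) * ((m - t : ℕ) : ℤ) = ((m.choose t * (m - t) : ℕ) : ℤ) := by push_cast; ring
      rw [this]
      have h1 : ((t : Int) + 1) = ((t + 1 : ℕ) : Int) := by push_cast; ring
      rw [h1, PySem.Int.floordiv_natCast]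
      rw [← Nat.choose_succ_right_eq, Nat.mul_div_cancel _ (by omega)]
    rw [hsign, hc]
    have ht' : (t + 1) + ys.length = m + 1 := by simp at ht; omega
    have hcast : ((t : Int) + 1) = (((t + 1 : ℕ)) : Int) := by push_cast; ring
    rw [hcast, ih (t + 1) (acc + (-1 : ℤ) ^ (m - t) * (m.choose t : Int) * y) ht']
    rw [List.length_cons, Finset.sum_range_succ']
    simp only [List.getD_cons_succ, List.getD_cons_zero, Nat.add_zero]
    have : ∀ k, t + 1 + k = t + (k + 1) := by omega
    rw [Finset.sum_congr rfl (fun k _ => by rw [this k])]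
    ring

lemma B_eq_sum (lst : List Int) (h : lst ≠ []) :
    n_differences_alt lst = some (pvSum (lst.length - 1) lst) := by
  have hlen : 1 ≤ lst.length := List.length_pos_iff.mpr h
  unfold n_differences_alt
  rw [if_neg h]
  have hn : (lst.length : Int) - 1 = ((lst.length - 1 : ℕ) : Int) := by omega
  simp only [hn]
  have hb := B_fold (lst.length - 1) lst 0 0 (by omega)
  simp only [Nat.choose_zero_right, Nat.cast_one, Nat.cast_zero] at hb
  rw [hb]
  unfold pvSum
  congr 1
  rw [zero_add]
  apply Finset.sum_congr (by rw [Nat.sub_add_cancel hlen])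
  intro k _
  rw [Nat.zero_add]

-- ===== VERDICT (by name: the statement is the Claim_ definition above) =====
theorem n_differences_spec : Claim_equal_n_differences := by
  intro lst _
  unfold Spec_n_differences
  by_cases h : lst = []
  · subst h; simp [n_differences, n_differences_alt]
  · rw [A_eq_sum lst h, B_eq_sum lst h]
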